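-- pv_equiv track=rewrite | github.com/jms7446/hackerrank | baekjoon/gold/p1188.py | solve
-- ===== SOURCE A (Python) =====
-- def solve(sausages, people):
--     cuts = 0
--     while people > 1:
--         sausages %= people
--         if sausages == 0:
--             return cuts
--         q, r = divmod(people, sausages)
--         if r == 0:
--             cuts += (q - 1) * sausages
--         else:
--             cuts += q * sausages
--         people = r
--     return cuts
-- ===== SOURCE B (Python) =====
-- import math
--
--
-- def solve(sausages, people):
--     # Closed form: cutting to share evenly needs people - gcd pieces kept whole.
--     if people <= 1:
--         return 0
--     return people - math.gcd(sausages, people)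
-- ===== Notes on version B (the rewrite author's own statement) =====
-- stated objective: simpler
-- what changed: Replaced the Euclidean-style loop that accumulates cut counts with the closed form people - gcd(sausages, people) (0 when people <= 1), using the standard-library gcd.
import Mathlib
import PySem

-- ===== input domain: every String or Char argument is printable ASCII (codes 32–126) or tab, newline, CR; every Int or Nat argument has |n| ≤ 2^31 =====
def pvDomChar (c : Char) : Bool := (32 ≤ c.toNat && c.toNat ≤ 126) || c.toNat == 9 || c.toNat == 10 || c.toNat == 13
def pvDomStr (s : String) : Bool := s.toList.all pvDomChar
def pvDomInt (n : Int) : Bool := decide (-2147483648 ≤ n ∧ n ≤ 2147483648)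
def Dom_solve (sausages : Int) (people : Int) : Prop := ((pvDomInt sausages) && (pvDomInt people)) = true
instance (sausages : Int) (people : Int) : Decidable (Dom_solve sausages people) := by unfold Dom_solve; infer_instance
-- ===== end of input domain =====

-- B replaces A's cut-accumulating Euclidean loop with the closed form
-- people - gcd(sausages, people) (0 when people ≤ 1); objective: simpler.

-- ===== PORT A =====
-- Python's % / // for a positive divisor coincide with Int.emod / Int.ediv
theorem pymod_eq (a b : Int) (hb : 0 < b) : PySem.Int.mod a b = a % b := by
  unfold PySem.Int.mod
  rw [Int.fmod_eq_emod, if_pos (Or.inl (le_of_lt hb))]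
  omega

-- bounds of Python's % for a positive divisor (used by the loop's termination)
theorem pymod_bounds (a b : Int) (hb : 0 < b) :
    0 ≤ PySem.Int.mod a b ∧ PySem.Int.mod a b < b := by
  rw [pymod_eq a b hb]
  exact ⟨Int.emod_nonneg a (by omega), Int.emod_lt_of_pos a hb⟩

-- while people > 1: … ;  state = (sausages, people, cuts);
-- in the body, s is 'sausages %= people', then q, r = divmod(people, s)
def solveLoop (sausages : Int) (people : Int) (cuts : Int) : Int :=
  if h : 1 < people then
    if hs : PySem.Int.mod sausages people = 0 then cuts   -- return cuts
    else
      if hr : PySem.Int.mod people (PySem.Int.mod sausages people) = 0 then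
        -- cuts += (q - 1) * s; people = r = 0 → loop exits, return cuts
        cuts + (PySem.Int.floordiv people (PySem.Int.mod sausages people) - 1)
                 * PySem.Int.mod sausages people
      else
        -- cuts += q * s; sausages, people = s, r
        solveLoop (PySem.Int.mod sausages people)
          (PySem.Int.mod people (PySem.Int.mod sausages people))
          (cuts + PySem.Int.floordiv people (PySem.Int.mod sausages people)
                    * PySem.Int.mod sausages people)
  else cuts
termination_by people.toNat
decreasing_by
  have h1 := pymod_bounds sausages people (by omega)
  have h2 := pymod_bounds people (PySem.Int.mod sausages people) (by omega)
  omega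

def solve (sausages : Int) (people : Int) : Int :=
  solveLoop sausages people 0

-- ===== PORT B =====
def solve_alt (sausages : Int) (people : Int) : Int :=
  if people ≤ 1 then 0
  else people - Int.gcd sausages people              -- math.gcd

-- ===== PRECONDITION & SPEC =====
def Spec_solve (sausages : Int) (people : Int) (out : Int) : Prop := out = solve_alt sausages people
instance (sausages : Int) (people : Int) (out : Int) : Decidable (Spec_solve sausages people out) := by unfold Spec_solve; infer_instance

-- ===== CLAIM (what is proved, stated in full; the proofs are below) =====
def Claim_equal_solve : Prop := ∀ (sausages : Int) (people : Int), Dom_solve sausages people → Spec_solve sausages people (solve sausages people)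

-- ===== LEMMAS AND PROOFS =====
theorem pydiv_eq (a b : Int) (hb : 0 < b) : PySem.Int.floordiv a b = a / b := by
  unfold PySem.Int.floordiv
  rw [Int.fdiv_eq_ediv, if_pos (Or.inl (le_of_lt hb))]
  omega

theorem solveLoop_eq (n : Nat) : ∀ (people : Int), people.toNat ≤ n →
    ∀ (sausages cuts : Int),
    solveLoop sausages people cuts =
      cuts + (if people ≤ 1 then 0 else people - Int.gcd sausages people) := by
  induction n with
  | zero =>
    intro people hp sausages cuts
    rw [solveLoop, dif_neg (show ¬ 1 < people by omega),
      if_pos (show people ≤ 1 by omega)]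
    omega
  | succ n ih =>
    intro people hp sausages cuts
    rw [solveLoop]
    by_cases h : 1 < people
    · have hp0 : 0 < people := by omega
      set s := PySem.Int.mod sausages people with hsdef
      have hse : s = sausages % people := pymod_eq sausages people hp0
      have hgcd1 : Int.gcd s people = Int.gcd sausages people := by
        rw [hse]; exact Int.gcd_emod sausages people
      by_cases hs : s = 0
      · -- people divides sausages: gcd = people, closed form gives 0 more cuts
        have hg : Int.gcd sausages people = people.natAbs := by
          rw [← hgcd1, hs, Int.gcd_zero_left]
        rw [dif_pos h, dif_pos hs, if_neg (show ¬ people ≤ 1 by omega), hg,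
          Int.natAbs_of_nonneg (le_of_lt hp0)]
        omega
      · have hsb := pymod_bounds sausages people hp0
        have hs0 : 0 < s := by omega
        set q := PySem.Int.floordiv people s with hqdef
        set r := PySem.Int.mod people s with hrdef
        have hre : r = people % s := pymod_eq people s hs0
        have hqe : q = people / s := pydiv_eq people s hs0
        have hsum : q * s + r = people := by
          rw [hqe, hre, Int.mul_comm]; exact Int.mul_ediv_add_emod people s
        have hgcd2 : Int.gcd r s = Int.gcd s people := by
          rw [hre, Int.gcd_emod, Int.gcd_comm]
        by_cases hr : r = 0
        · -- s divides people: gcd = s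
          have hg : Int.gcd sausages people = s.natAbs := by
            rw [← hgcd1, ← hgcd2, hr, Int.gcd_zero_left]
          rw [dif_pos h, dif_neg hs, dif_pos hr,
            if_neg (show ¬ people ≤ 1 by omega), hg,
            Int.natAbs_of_nonneg (le_of_lt hs0)]
          have hq : (q - 1) * s = people - s := by
            rw [sub_mul, one_mul]; omega
          linarith
        · have hrb : 0 < r ∧ r < s := by
            have := pymod_bounds people s hs0; omega
          have hrn : r.toNat ≤ n := by omega
          rw [dif_pos h, dif_neg hs, dif_neg hr, ih r hrn s (cuts + q * s),
            if_neg (show ¬ people ≤ 1 by omega)]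
          have hgr : Int.gcd s r = Int.gcd sausages people := by
            rw [Int.gcd_comm, hgcd2, hgcd1]
          by_cases hr1 : r ≤ 1
          · -- r = 1: gcd = 1, the loop exits with cuts = people - 1
            have hr1' : r = 1 := by omega
            have hg1 : Int.gcd sausages people = 1 := by
              rw [← hgr, hr1', Int.gcd_one_right]
            rw [if_pos hr1, hg1]
            push_cast
            linarith
          · rw [if_neg hr1, hgr]
            linarith
    · rw [dif_neg h, if_pos (show people ≤ 1 by omega)]
      omega

theorem solve_spec : Claim_equal_solve := by
  intro sausages people _
  unfold Spec_solve solve solve_alt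
  rw [solveLoop_eq people.toNat people (le_refl _) sausages 0]
  by_cases h : people ≤ 1 <;> simp [h]
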